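-- pv_equiv track=rewrite | github.com/MJO-Teleconnection-Diagnostics/pyMTDG | eke/eke_util.py | get_rmm_composite_list
-- ===== SOURCE A (Python) =====
-- def get_rmm_composite_list ( composite_phase_names , model_yyyymmdd , rmm_yyyymmdd , rmm_phase_in , rmm_amplitude_in , amplitude_threshold , start_month , end_month ) :
--     rmm_list = [ ]
--     for phase_n in range ( len ( composite_phase_names ) ) : rmm_list.append ( [ ] )
--     if start_month > end_month :
--         for time_step in range ( len ( model_yyyymmdd ) ) :
--             month_now = model_yyyymmdd [ time_step ] // 100 % 100
--             if month_now >= start_month or month_now <= end_month :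
--                 time_n = 0
--                 while rmm_yyyymmdd [ time_n ] < model_yyyymmdd [ time_step ] : time_n = time_n + 1
--                 if rmm_amplitude_in [ time_n ] > amplitude_threshold :
--                     rmm_list [ rmm_phase_in [ time_n ] // 2 % 4 ].append ( time_step )
--     else :
--         for time_step in range ( len ( model_yyyymmdd ) ) :
--             month_now = model_yyyymmdd [ time_step ] // 100 % 100
--             if month_now >= start_month and month_now <= end_month :
--                 time_n = 0
--                 while rmm_yyyymmdd [ time_n ] < model_yyyymmdd [ time_step ] : time_n = time_n + 1
--                 if rmm_amplitude_in [ time_n ] > amplitude_threshold :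
--                     rmm_list [ rmm_phase_in [ time_n ] // 2 % 4 ].append ( time_step )
--     return rmm_list
-- ===== SOURCE B (Python) =====
-- def get_rmm_composite_list(composite_phase_names, model_yyyymmdd, rmm_yyyymmdd, rmm_phase_in, rmm_amplitude_in, amplitude_threshold, start_month, end_month):
--     # One pass builds the running maximum of rmm_yyyymmdd; the first index with
--     # rmm_yyyymmdd[i] >= v equals the first index with running_max[i] >= v, and the
--     # running max is nondecreasing, so a binary search finds that index.
--     prefix_max = []
--     cur = None
--     for x in rmm_yyyymmdd:
--         if cur is None or x > cur:
--             cur = x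
--         prefix_max.append(cur)
--     rmm_list = [[] for _ in composite_phase_names]
--     for time_step, v in enumerate(model_yyyymmdd):
--         month_now = v // 100 % 100
--         if start_month > end_month:
--             ok = month_now >= start_month or month_now <= end_month
--         else:
--             ok = month_now >= start_month and month_now <= end_month
--         if ok:
--             lo, hi = 0, len(prefix_max)
--             while lo < hi:
--                 mid = (lo + hi) // 2
--                 if prefix_max[mid] < v:
--                     lo = mid + 1
--                 else:
--                     hi = mid
--             if rmm_amplitude_in[lo] > amplitude_threshold:
--                 rmm_list[rmm_phase_in[lo] // 2 % 4].append(time_step)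
--     return rmm_list
-- ===== Notes on version B (the rewrite author's own statement) =====
-- stated objective: alternative
-- what changed: A rescans rmm_yyyymmdd from index 0 for every model timestep; B builds the running maximum of rmm_yyyymmdd once and binary-searches it (the first index with rmm>=v equals the first index with running-max>=v, and the running max is nondecreasing), trading A's per-timestep forward scan for a precomputed monotone array plus binary search.
import Mathlib
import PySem

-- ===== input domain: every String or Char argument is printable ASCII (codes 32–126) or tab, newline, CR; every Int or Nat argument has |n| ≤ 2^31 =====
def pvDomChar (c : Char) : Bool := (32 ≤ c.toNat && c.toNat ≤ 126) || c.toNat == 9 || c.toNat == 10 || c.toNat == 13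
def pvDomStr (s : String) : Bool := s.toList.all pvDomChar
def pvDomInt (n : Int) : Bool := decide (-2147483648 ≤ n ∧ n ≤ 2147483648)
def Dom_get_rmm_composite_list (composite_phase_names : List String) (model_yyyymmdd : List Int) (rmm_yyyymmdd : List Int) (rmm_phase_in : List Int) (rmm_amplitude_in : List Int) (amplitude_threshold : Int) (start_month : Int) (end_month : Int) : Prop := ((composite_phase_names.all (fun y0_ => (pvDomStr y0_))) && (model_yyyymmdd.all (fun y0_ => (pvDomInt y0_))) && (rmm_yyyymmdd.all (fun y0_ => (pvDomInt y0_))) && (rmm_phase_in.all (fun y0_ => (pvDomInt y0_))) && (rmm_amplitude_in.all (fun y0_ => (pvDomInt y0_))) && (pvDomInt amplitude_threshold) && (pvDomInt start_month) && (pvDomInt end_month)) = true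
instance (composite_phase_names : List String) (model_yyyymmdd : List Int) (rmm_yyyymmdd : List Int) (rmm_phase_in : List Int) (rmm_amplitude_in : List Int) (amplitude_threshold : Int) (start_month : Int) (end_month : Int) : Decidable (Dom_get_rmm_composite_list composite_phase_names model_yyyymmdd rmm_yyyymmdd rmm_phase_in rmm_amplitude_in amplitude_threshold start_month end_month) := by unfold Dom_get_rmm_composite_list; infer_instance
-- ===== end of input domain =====

-- B replaces A's per-timestep forward rescan of rmm_yyyymmdd by one running-maximum pass
-- plus a binary search per timestep (objective: alternative algorithm, same measured cost).

-- shared small arithmetic helpers (exact Python // and %)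
def pvMonth (v : Int) : Int := PySem.Int.mod (PySem.Int.floordiv v 100) 100
def pvBucket (p : Int) : Nat := (PySem.Int.mod (PySem.Int.floordiv p 2) 4).toNat

-- ===== PORT A =====
-- the while loop 'time_n = 0; while rmm[time_n] < v: time_n += 1' (none = IndexError)
def scanGe : List Int → Int → Nat → Option Nat
  | [], _, _ => none
  | x :: xs, v, j => if x < v then scanGe xs v (j + 1) else some j

-- body executed for an admitted time_step (pyGet? none = IndexError path, outside Pre_)
def stepA (rmm ph amp : List Int) (thr : Int) (acc : List (List Int)) (ts : Nat) (v : Int) : List (List Int) :=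
  match scanGe rmm v 0 with
  | none => acc
  | some j =>
    match PySem.List.pyGet? amp (Int.ofNat j) with
    | none => acc
    | some a =>
      if a > thr then
        match PySem.List.pyGet? ph (Int.ofNat j) with
        | none => acc
        | some p => acc.set (pvBucket p) (acc.getD (pvBucket p) [] ++ [(ts : Int)])
      else acc

-- 'rmm_list = []; for phase_n in range(len(names)): rmm_list.append([])'
def pvInitA (composite_phase_names : List String) : List (List Int) :=
  (List.range composite_phase_names.length).foldl (fun l _ => l ++ [([] : List Int)]) []

def get_rmm_composite_list (composite_phase_names : List String) (model_yyyymmdd : List Int) (rmm_yyyymmdd : List Int) (rmm_phase_in : List Int) (rmm_amplitude_in : List Int) (amplitude_threshold : Int) (start_month : Int) (end_month : Int) : List (List Int) :=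
  if start_month > end_month then
    (List.range model_yyyymmdd.length).foldl (fun acc ts =>
      if pvMonth (model_yyyymmdd.getD ts 0) ≥ start_month ∨ pvMonth (model_yyyymmdd.getD ts 0) ≤ end_month then
        stepA rmm_yyyymmdd rmm_phase_in rmm_amplitude_in amplitude_threshold acc ts (model_yyyymmdd.getD ts 0)
      else acc) (pvInitA composite_phase_names)
  else
    (List.range model_yyyymmdd.length).foldl (fun acc ts =>
      if pvMonth (model_yyyymmdd.getD ts 0) ≥ start_month ∧ pvMonth (model_yyyymmdd.getD ts 0) ≤ end_month then
        stepA rmm_yyyymmdd rmm_phase_in rmm_amplitude_in amplitude_threshold acc ts (model_yyyymmdd.getD ts 0)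
      else acc) (pvInitA composite_phase_names)

-- ===== PORT B =====
-- running maximum of rmm_yyyymmdd (B's 'cur = None' loop)
def omax : Option Int → Int → Int
  | none, x => x
  | some c0, x => if x > c0 then x else c0

def prefixMax : List Int → Option Int → List Int
  | [], _ => []
  | x :: xs, cur => omax cur x :: prefixMax xs (some (omax cur x))

-- B's hand-written 'lo, hi' binary search (pm[mid] via getD: mid is always in range when hi ≤ pm.length)
def bsearch (pm : List Int) (v : Int) (lo hi : Nat) : Nat :=
  if h : lo < hi then
    if pm.getD ((lo + hi) / 2) 0 < v then bsearch pm v ((lo + hi) / 2 + 1) hi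
    else bsearch pm v lo ((lo + hi) / 2)
  else lo
termination_by hi - lo
decreasing_by all_goals omega

def stepB (pm ph amp : List Int) (thr : Int) (acc : List (List Int)) (ts : Nat) (v : Int) : List (List Int) :=
  match PySem.List.pyGet? amp (Int.ofNat (bsearch pm v 0 pm.length)) with
  | none => acc
  | some a =>
    if a > thr then
      match PySem.List.pyGet? ph (Int.ofNat (bsearch pm v 0 pm.length)) with
      | none => acc
      | some p => acc.set (pvBucket p) (acc.getD (pvBucket p) [] ++ [(ts : Int)])
    else acc

def get_rmm_composite_list_alt (composite_phase_names : List String) (model_yyyymmdd : List Int) (rmm_yyyymmdd : List Int) (rmm_phase_in : List Int) (rmm_amplitude_in : List Int) (amplitude_threshold : Int) (start_month : Int) (end_month : Int) : List (List Int) :=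
  (List.range model_yyyymmdd.length).foldl (fun acc ts =>
    if (if start_month > end_month
        then pvMonth (model_yyyymmdd.getD ts 0) ≥ start_month ∨ pvMonth (model_yyyymmdd.getD ts 0) ≤ end_month
        else pvMonth (model_yyyymmdd.getD ts 0) ≥ start_month ∧ pvMonth (model_yyyymmdd.getD ts 0) ≤ end_month) then
      stepB (prefixMax rmm_yyyymmdd none) rmm_phase_in rmm_amplitude_in amplitude_threshold acc ts (model_yyyymmdd.getD ts 0)
    else acc) (composite_phase_names.map (fun _ => ([] : List Int)))

-- ===== PRECONDITION & SPEC =====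
-- Pre_ = exactly the inputs on which the Python A returns (no IndexError): every month-admitted
-- timestep has a first rmm_yyyymmdd entry ≥ its date, that stop index is inside
-- rmm_amplitude_in, and (when the amplitude test fires) inside rmm_phase_in with its
-- RMM bucket inside composite_phase_names.
def Pre_get_rmm_composite_list (composite_phase_names : List String) (model_yyyymmdd : List Int) (rmm_yyyymmdd : List Int) (rmm_phase_in : List Int) (rmm_amplitude_in : List Int) (amplitude_threshold : Int) (start_month : Int) (end_month : Int) : Prop :=
  ∀ i < model_yyyymmdd.length,
    (if start_month > end_month
       then pvMonth (model_yyyymmdd.getD i 0) ≥ start_month ∨ pvMonth (model_yyyymmdd.getD i 0) ≤ end_month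
       else pvMonth (model_yyyymmdd.getD i 0) ≥ start_month ∧ pvMonth (model_yyyymmdd.getD i 0) ≤ end_month) →
    ∃ j < rmm_yyyymmdd.length,
      model_yyyymmdd.getD i 0 ≤ rmm_yyyymmdd.getD j 0 ∧
      (∀ k < j, rmm_yyyymmdd.getD k 0 < model_yyyymmdd.getD i 0) ∧
      j < rmm_amplitude_in.length ∧
      (rmm_amplitude_in.getD j 0 > amplitude_threshold →
        j < rmm_phase_in.length ∧ pvBucket (rmm_phase_in.getD j 0) < composite_phase_names.length)
instance (composite_phase_names : List String) (model_yyyymmdd : List Int) (rmm_yyyymmdd : List Int) (rmm_phase_in : List Int) (rmm_amplitude_in : List Int) (amplitude_threshold : Int) (start_month : Int) (end_month : Int) : Decidable (Pre_get_rmm_composite_list composite_phase_names model_yyyymmdd rmm_yyyymmdd rmm_phase_in rmm_amplitude_in amplitude_threshold start_month end_month) := by unfold Pre_get_rmm_composite_list; infer_instance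

def pvWitness_get_rmm_composite_list : List String × List Int × List Int × List Int × List Int × Int × Int × Int :=
  (["P12", "P34", "P56", "P78"], [20000105, 20000620], [20000101, 20000110, 20000625], [3, 5, 8], [2, 0, 2], 1, 1, 3)

def Spec_get_rmm_composite_list (composite_phase_names : List String) (model_yyyymmdd : List Int) (rmm_yyyymmdd : List Int) (rmm_phase_in : List Int) (rmm_amplitude_in : List Int) (amplitude_threshold : Int) (start_month : Int) (end_month : Int) (out : List (List Int)) : Prop := out = get_rmm_composite_list_alt composite_phase_names model_yyyymmdd rmm_yyyymmdd rmm_phase_in rmm_amplitude_in amplitude_threshold start_month end_month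
instance (composite_phase_names : List String) (model_yyyymmdd : List Int) (rmm_yyyymmdd : List Int) (rmm_phase_in : List Int) (rmm_amplitude_in : List Int) (amplitude_threshold : Int) (start_month : Int) (end_month : Int) (out : List (List Int)) : Decidable (Spec_get_rmm_composite_list composite_phase_names model_yyyymmdd rmm_yyyymmdd rmm_phase_in rmm_amplitude_in amplitude_threshold start_month end_month out) := by unfold Spec_get_rmm_composite_list; infer_instance

-- ===== CLAIM (what is proved, stated in full; the proofs are below) =====
def Claim_equal_get_rmm_composite_list : Prop := ∀ (composite_phase_names : List String) (model_yyyymmdd : List Int) (rmm_yyyymmdd : List Int) (rmm_phase_in : List Int) (rmm_amplitude_in : List Int) (amplitude_threshold : Int) (start_month : Int) (end_month : Int), Dom_get_rmm_composite_list composite_phase_names model_yyyymmdd rmm_yyyymmdd rmm_phase_in rmm_amplitude_in amplitude_threshold start_month end_month → Pre_get_rmm_composite_list composite_phase_names model_yyyymmdd rmm_yyyymmdd rmm_phase_in rmm_amplitude_in amplitude_threshold start_month end_month → Spec_get_rmm_composite_list composite_phase_names model_yyyymmdd rmm_yyyymmdd rmm_phase_in rmm_amplitude_in amplitude_threshold start_month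 end_month (get_rmm_composite_list composite_phase_names model_yyyymmdd rmm_yyyymmdd rmm_phase_in rmm_amplitude_in amplitude_threshold start_month end_month)

-- ===== LEMMAS AND PROOFS =====

-- the two initialisations agree
theorem pvInitA_foldl (n : Nat) (acc : List (List Int)) :
    (List.range n).foldl (fun l _ => l ++ [([] : List Int)]) acc = acc ++ List.replicate n [] := by
  induction n generalizing acc with
  | zero => simp
  | succ n ih => rw [List.range_succ]; simp [List.foldl_append, ih, List.replicate_succ']

theorem init_eq (names : List String) :
    pvInitA names = names.map (fun _ => ([] : List Int)) := by
  unfold pvInitA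
  rw [pvInitA_foldl]
  simp [List.map_const']

-- the while loop stops exactly at the first index j with v ≤ rmm[j]
theorem scanGe_eq_some (l : List Int) (v : Int) :
    ∀ (i j : Nat), j < l.length → v ≤ l.getD j 0 → (∀ k < j, l.getD k 0 < v) →
    scanGe l v i = some (i + j) := by
  induction l with
  | nil => intro i j hj; simp at hj
  | cons x xs ih =>
    intro i j hj hv hk
    by_cases hx : x < v
    · match j, hj with
      | 0, _ => simp at hv; omega
      | j' + 1, hj =>
        rw [scanGe, if_pos hx]
        have := ih (i + 1) j' (by simpa using hj) (by simpa using hv)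
          (fun k hkj => by have := hk (k + 1) (by omega); simpa using this)
        rw [this]; congr 1; omega
    · rw [scanGe, if_neg hx]
      have hj0 : j = 0 := by
        by_contra h
        exact hx (by simpa using hk 0 (by omega))
      simp [hj0]

-- prefixMax has the same length as its input
theorem prefixMax_length (l : List Int) (c : Option Int) :
    (prefixMax l c).length = l.length := by
  induction l generalizing c with
  | nil => rfl
  | cons x xs ih => simp [prefixMax, ih]

-- the running maximum dominates v at k iff some prefix entry does (or the carried max does)
theorem prefixMax_ge_iff (v : Int) (l : List Int) :
    ∀ (c : Option Int) (k : Nat), k < l.length →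
    (v ≤ (prefixMax l c).getD k 0 ↔
      ((∃ c0, c = some c0 ∧ v ≤ c0) ∨ ∃ t ≤ k, v ≤ l.getD t 0)) := by
  induction l with
  | nil => intro c k hk; simp at hk
  | cons x xs ih =>
    intro c k hk
    have hc : v ≤ omax c x ↔ ((∃ c1, c = some c1 ∧ v ≤ c1) ∨ v ≤ x) := by
      cases c with
      | none => simp [omax]
      | some c1 => simp only [omax]; split_ifs with h <;> simp_all <;> omega
    match k with
    | 0 =>
      simp only [prefixMax, List.getD_cons_zero]
      rw [hc]
      constructor
      · rintro (h | h)
        · exact Or.inl h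
        · exact Or.inr ⟨0, by omega, by simpa using h⟩
      · rintro (h | ⟨t, ht, hv⟩)
        · exact Or.inl h
        · have : t = 0 := by omega
          subst this; simp at hv; exact Or.inr hv
    | k' + 1 =>
      simp only [prefixMax, List.getD_cons_succ]
      rw [ih _ k' (by simpa using hk)]
      constructor
      · rintro (⟨c0, hc0, hvc⟩ | ⟨t, ht, hv⟩)
        · rcases hc.mp (by rw [Option.some.injEq] at hc0; omega) with h | h
          · exact Or.inl h
          · exact Or.inr ⟨0, by omega, by simpa using h⟩
        · exact Or.inr ⟨t + 1, by omega, by simpa using hv⟩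
      · rintro (h | ⟨t, ht, hv⟩)
        · exact Or.inl ⟨_, rfl, hc.mpr (Or.inl h)⟩
        · match t with
          | 0 => exact Or.inl ⟨_, rfl, hc.mpr (Or.inr (by simpa using hv))⟩
          | t' + 1 => exact Or.inr ⟨t', by omega, by simpa using hv⟩

-- specialisation to the full list: pm[k] ≥ v ↔ some rmm[t] ≥ v with t ≤ k
theorem prefixMax_none_ge_iff (v : Int) (l : List Int) (k : Nat) (hk : k < l.length) :
    v ≤ (prefixMax l none).getD k 0 ↔ ∃ t ≤ k, v ≤ l.getD t 0 := by
  rw [prefixMax_ge_iff v l none k hk]; simp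

-- the running maximum is monotone
theorem prefixMax_mono (l : List Int) (i j : Nat) (hij : i ≤ j) (hj : j < l.length) :
    (prefixMax l none).getD i 0 ≤ (prefixMax l none).getD j 0 := by
  have hi : i < l.length := by omega
  have h1 := (prefixMax_none_ge_iff ((prefixMax l none).getD i 0) l i hi).mp le_rfl
  obtain ⟨t, ht, hv⟩ := h1
  exact (prefixMax_none_ge_iff _ l j hj).mpr ⟨t, by omega, hv⟩

-- binary-search invariant
theorem bsearch_spec (pm : List Int) (v : Int)
    (mono : ∀ i j, i ≤ j → j < pm.length → pm.getD i 0 ≤ pm.getD j 0) :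
    ∀ (n lo hi : Nat), hi - lo ≤ n → lo ≤ hi → hi ≤ pm.length →
    (∀ k < lo, pm.getD k 0 < v) → (∀ k, hi ≤ k → k < pm.length → v ≤ pm.getD k 0) →
    (∀ k < bsearch pm v lo hi, pm.getD k 0 < v) ∧ bsearch pm v lo hi ≤ pm.length ∧
      (bsearch pm v lo hi < pm.length → v ≤ pm.getD (bsearch pm v lo hi) 0) := by
  intro n
  induction n with
  | zero =>
    intro lo hi hn hle hhi hlo hup
    have : lo = hi := by omega
    subst this
    rw [bsearch, dif_neg (by omega)]
    exact ⟨hlo, by omega, fun h => hup lo le_rfl h⟩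
  | succ n ih =>
    intro lo hi hn hle hhi hlo hup
    rw [bsearch]
    by_cases h : lo < hi
    · rw [dif_pos h]
      set mid := (lo + hi) / 2 with hmid
      have hmlo : lo ≤ mid := by omega
      have hmhi : mid < hi := by omega
      by_cases hm : pm.getD mid 0 < v
      · rw [if_pos hm]
        refine ih (mid + 1) hi (by omega) (by omega) hhi ?_ hup
        intro k hk
        exact lt_of_le_of_lt (mono k mid (by omega) (by omega)) hm
      · rw [if_neg hm]
        refine ih lo mid (by omega) (by omega) (by omega) hlo ?_
        intro k hk hkl
        exact le_trans (not_lt.mp hm) (mono mid k hk hkl)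
    · rw [dif_neg h]
      exact ⟨hlo, by omega, fun hl => hup lo (by omega) hl⟩

-- under Pre_'s first-index clause, the binary search returns exactly the while loop's stop index
theorem bsearch_eq (rmm : List Int) (v : Int) (j : Nat)
    (hj : j < rmm.length) (hv : v ≤ rmm.getD j 0) (hk : ∀ k < j, rmm.getD k 0 < v) :
    bsearch (prefixMax rmm none) v 0 (prefixMax rmm none).length = j := by
  set pm := prefixMax rmm none with hpm
  have hlen : pm.length = rmm.length := prefixMax_length rmm none
  have hspec := bsearch_spec pm v (fun i j hij hjl => prefixMax_mono rmm i j hij (hlen ▸ hjl))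
    pm.length 0 pm.length (by omega) (by omega) le_rfl (by omega) (fun k hk1 hk2 => by omega)
  obtain ⟨hlow, hle, hhigh⟩ := hspec
  -- characterisation of j on pm
  have hpmj : v ≤ pm.getD j 0 := (prefixMax_none_ge_iff v rmm j hj).mpr ⟨j, le_rfl, hv⟩
  have hpmk : ∀ k < j, pm.getD k 0 < v := by
    intro k hkj
    by_contra hcon
    rw [not_lt] at hcon
    obtain ⟨t, ht, hvt⟩ := (prefixMax_none_ge_iff v rmm k (by omega)).mp hcon
    exact absurd hvt (not_le.mpr (hk t (by omega)))
  set r := bsearch pm v 0 pm.length with hr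
  by_contra hne
  rcases Nat.lt_or_ge r j with hlt | hge
  · exact absurd (hhigh (by omega)) (not_le.mpr (hpmk r hlt))
  · have : j < r := by omega
    exact absurd hpmj (not_le.mpr (hlow j this))

-- the two loop bodies agree on every admitted timestep
theorem step_eq (rmm ph amp : List Int) (thr v : Int) (acc : List (List Int)) (ts : Nat)
    (h : ∃ j < rmm.length, v ≤ rmm.getD j 0 ∧ (∀ k < j, rmm.getD k 0 < v)) :
    stepA rmm ph amp thr acc ts v = stepB (prefixMax rmm none) ph amp thr acc ts v := by
  obtain ⟨j, hj, hv, hk⟩ := h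
  have h1 : scanGe rmm v 0 = some j := by simpa using scanGe_eq_some rmm v 0 j hj hv hk
  have h2 : bsearch (prefixMax rmm none) v 0 (prefixMax rmm none).length = j := bsearch_eq rmm v j hj hv hk
  unfold stepA stepB
  rw [h1, h2]

-- ===== VERDICT (by name: the statement is the Claim_ definition above) =====
theorem get_rmm_composite_list_spec : Claim_equal_get_rmm_composite_list := by
  intro names model rmm ph amp thr sm em _hDom hPre
  unfold Spec_get_rmm_composite_list
  unfold get_rmm_composite_list get_rmm_composite_list_alt
  rw [init_eq]
  by_cases hse : sm > em
  · rw [if_pos hse]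
    apply List.foldl_ext
    intro acc ts hts
    rw [List.mem_range] at hts
    by_cases hP : pvMonth (model.getD ts 0) ≥ sm ∨ pvMonth (model.getD ts 0) ≤ em
    · have hP' : (if sm > em then pvMonth (model.getD ts 0) ≥ sm ∨ pvMonth (model.getD ts 0) ≤ em
          else pvMonth (model.getD ts 0) ≥ sm ∧ pvMonth (model.getD ts 0) ≤ em) := by
        rw [if_pos hse]; exact hP
      rw [if_pos hP, if_pos hP']
      obtain ⟨j, hj, h1, h2, _⟩ := hPre ts hts hP'
      exact step_eq rmm ph amp thr (model.getD ts 0) acc ts ⟨j, hj, h1, h2⟩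
    · have hP' : ¬ (if sm > em then pvMonth (model.getD ts 0) ≥ sm ∨ pvMonth (model.getD ts 0) ≤ em
          else pvMonth (model.getD ts 0) ≥ sm ∧ pvMonth (model.getD ts 0) ≤ em) := by
        rw [if_pos hse]; exact hP
      rw [if_neg hP, if_neg hP']
  · rw [if_neg hse]
    apply List.foldl_ext
    intro acc ts hts
    rw [List.mem_range] at hts
    by_cases hP : pvMonth (model.getD ts 0) ≥ sm ∧ pvMonth (model.getD ts 0) ≤ em
    · have hP' : (if sm > em then pvMonth (model.getD ts 0) ≥ sm ∨ pvMonth (model.getD ts 0) ≤ em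
          else pvMonth (model.getD ts 0) ≥ sm ∧ pvMonth (model.getD ts 0) ≤ em) := by
        rw [if_neg hse]; exact hP
      rw [if_pos hP, if_pos hP']
      obtain ⟨j, hj, h1, h2, _⟩ := hPre ts hts hP'
      exact step_eq rmm ph amp thr (model.getD ts 0) acc ts ⟨j, hj, h1, h2⟩
    · have hP' : ¬ (if sm > em then pvMonth (model.getD ts 0) ≥ sm ∨ pvMonth (model.getD ts 0) ≤ em
          else pvMonth (model.getD ts 0) ≥ sm ∧ pvMonth (model.getD ts 0) ≤ em) := by
        rw [if_neg hse]; exact hP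
      rw [if_neg hP, if_neg hP']
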